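-- pv_equiv track=rewrite | github.com/saiakarsh193/PyCube-Solver | helper.py | parCondense
-- ===== SOURCE A (Python) =====
-- def parCondense(form, tar):
--     """
--     Performs paranthesis reduction at a particular depth.
--
--     Parameters
--     ----------
--     form : string
--         Formula.
--     tar : int
--         Target depth for paranthesis condensation.
--
--     Returns
--     -------
--     ans : string
--         The condensed paranthesis form of the given formula.
--     """
--     form += '@'
--     ans = ""
--     temp = ""
--     ref = ""
--     refctr = 0
--     ctr = 0
--     for ch in form:
--         if(ch == '('):
--             ctr += 1
--         if(ctr >= tar):
--             temp += ch
--         else: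
--             if(len(ref) > 0):
--                 ans += ref
--                 ans += str(refctr) if refctr > 1 else ""
--                 ref = ""
--                 refctr = 0
--             ans += ch
--         if(ch == ')'):
--             if(ctr == tar):
--                 if(temp == ref):
--                     refctr += 1
--                 else:
--                     ans += ref
--                     ans += str(refctr) if refctr > 1 else ""
--                     ref = temp
--                     refctr = 1
--                 temp = ""
--             ctr -= 1
--     ans = ans[:-1]
--     return ans
-- ===== SOURCE B (Python) =====
-- def parCondense(form, tar):
--     # Two-phase rewrite: tokenize into literals / complete depth-`tar` groups,
--     # then run-length-encode consecutive identical groups.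
--     toks = []            # (True, group_string) or (False, single_char)
--     buf = ""
--     ctr = 0
--     for ch in form + '@':
--         if ch == '(':
--             ctr += 1
--         if ctr >= tar:
--             buf += ch
--             if ch == ')' and ctr == tar:
--                 toks.append((True, buf))
--                 buf = ""
--         else:
--             toks.append((False, ch))
--         if ch == ')':
--             ctr -= 1
--     out = ""
--     ref = ""
--     cnt = 0
--     for isg, t in toks:
--         if isg:
--             if t == ref:
--                 cnt += 1
--             else:
--                 if ref:
--                     out += ref + (str(cnt) if cnt > 1 else "")
--                 ref, cnt = t, 1
--         else:
--             if ref: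
--                 out += ref + (str(cnt) if cnt > 1 else "")
--                 ref, cnt = "", 0
--             out += t
--     return out[:-1]
-- ===== Notes on version B (the rewrite author's own statement) =====
-- stated objective: alternative
-- what changed: Replaced A's single pass with five interleaved accumulators by a two-phase pipeline: a tokenizer that emits literal characters and complete depth-tar group strings, followed by a run-length-encoding pass over the token list.
import Mathlib
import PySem

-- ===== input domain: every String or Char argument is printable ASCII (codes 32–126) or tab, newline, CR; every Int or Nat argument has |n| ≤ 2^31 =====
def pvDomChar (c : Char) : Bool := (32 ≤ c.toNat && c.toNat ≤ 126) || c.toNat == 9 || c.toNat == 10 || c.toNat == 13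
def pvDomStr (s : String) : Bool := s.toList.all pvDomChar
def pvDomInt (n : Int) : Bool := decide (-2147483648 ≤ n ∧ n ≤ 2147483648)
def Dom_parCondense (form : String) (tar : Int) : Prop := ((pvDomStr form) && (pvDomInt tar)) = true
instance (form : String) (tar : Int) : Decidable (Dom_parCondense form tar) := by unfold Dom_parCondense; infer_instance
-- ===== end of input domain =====

-- B replaces A's single pass with five interleaved accumulators by a two-phase
-- pipeline (tokenize, then run-length-encode the group tokens); same cost, different decomposition.

-- str(refctr) if refctr > 1 else ""  (shared numeric-suffix rendering)
def pvCntStr (n : Int) : List Char := if n > 1 then (PySem.Int.toStr n).toList else []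

-- ===== PORT A =====
-- state: (ans, temp, ref, refctr, ctr)
def pvStepA (tar : Int) (s : List Char × List Char × List Char × Int × Int) (ch : Char) :
    List Char × List Char × List Char × Int × Int :=
  match s with
  | (ans, temp, ref, refctr, ctr0) =>
    let ctr := if ch = '(' then ctr0 + 1 else ctr0
    let s1 :=
      if tar ≤ ctr then (ans, temp ++ [ch], ref, refctr)
      else
        if 0 < ref.length then
          (ans ++ ref ++ pvCntStr refctr ++ [ch], temp, ([] : List Char), (0 : Int))
        else (ans ++ [ch], temp, ref, refctr)
    match s1 with
    | (ans, temp, ref, refctr) =>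
      if ch = ')' then
        if ctr = tar then
          if temp = ref then (ans, ([] : List Char), ref, refctr + 1, ctr - 1)
          else (ans ++ ref ++ pvCntStr refctr, ([] : List Char), temp, (1 : Int), ctr - 1)
        else (ans, temp, ref, refctr, ctr - 1)
      else (ans, temp, ref, refctr, ctr)

def parCondense (form : String) (tar : Int) : String :=
  match (form.toList ++ ['@']).foldl (pvStepA tar) ([], [], [], 0, 0) with
  | (ans, _, _, _, _) => String.mk (PySem.List.slice ans none (some (-1)))   -- ans[:-1]

-- ===== PORT B =====
-- phase 1 state: (toks, buf, ctr); token = (isGroup, chars)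
def pvStepTok (tar : Int) (st : List (Bool × List Char) × List Char × Int) (ch : Char) :
    List (Bool × List Char) × List Char × Int :=
  match st with
  | (toks, buf, ctr0) =>
    let ctr := if ch = '(' then ctr0 + 1 else ctr0
    let s1 :=
      if tar ≤ ctr then
        let buf' := buf ++ [ch]
        if ch = ')' ∧ ctr = tar then (toks ++ [(true, buf')], ([] : List Char))
        else (toks, buf')
      else (toks ++ [(false, [ch])], buf)
    (s1.1, s1.2, if ch = ')' then ctr - 1 else ctr)

-- phase 2 state: (out, ref, cnt)
def pvStepRle (st : List Char × List Char × Int) (tk : Bool × List Char) :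
    List Char × List Char × Int :=
  match st, tk with
  | (out, ref, cnt), (isg, t) =>
    if isg then
      if t = ref then (out, ref, cnt + 1)
      else if 0 < ref.length then (out ++ ref ++ pvCntStr cnt, t, (1 : Int))
      else (out, t, (1 : Int))
    else
      if 0 < ref.length then (out ++ ref ++ pvCntStr cnt ++ t, ([] : List Char), (0 : Int))
      else (out ++ t, ref, cnt)

def parCondense_alt (form : String) (tar : Int) : String :=
  match (form.toList ++ ['@']).foldl (pvStepTok tar) ([], [], 0) with
  | (toks, _, _) =>
    match toks.foldl pvStepRle ([], [], 0) with
    | (out, _, _) => String.mk (PySem.List.slice out none (some (-1)))   -- out[:-1]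

-- ===== PRECONDITION & SPEC =====
def Spec_parCondense (form : String) (tar : Int) (out : String) : Prop := out = parCondense_alt form tar
instance (form : String) (tar : Int) (out : String) : Decidable (Spec_parCondense form tar out) := by unfold Spec_parCondense; infer_instance

-- ===== CLAIM (what is proved, stated in full; the proofs are below) =====
def Claim_equal_parCondense : Prop := ∀ (form : String) (tar : Int), Dom_parCondense form tar → Spec_parCondense form tar (parCondense form tar)

-- ===== LEMMAS AND PROOFS =====

-- the tokenizer only appends to its token accumulator: one step
lemma pvStepTokShift (tar : Int) (toks0 : List (Bool × List Char)) (buf : List Char)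
    (ctr : Int) (ch : Char) :
    pvStepTok tar (toks0, buf, ctr) ch
      = (toks0 ++ (pvStepTok tar ([], buf, ctr) ch).1,
         (pvStepTok tar ([], buf, ctr) ch).2.1,
         (pvStepTok tar ([], buf, ctr) ch).2.2) := by
  simp only [pvStepTok]
  split_ifs <;> simp

-- the tokenizer only appends to its token accumulator
lemma pvTokShift (tar : Int) (cs : List Char) :
    ∀ (toks0 : List (Bool × List Char)) (buf : List Char) (ctr : Int),
    cs.foldl (pvStepTok tar) (toks0, buf, ctr)
      = (toks0 ++ (cs.foldl (pvStepTok tar) ([], buf, ctr)).1,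
         (cs.foldl (pvStepTok tar) ([], buf, ctr)).2.1,
         (cs.foldl (pvStepTok tar) ([], buf, ctr)).2.2) := by
  induction cs with
  | nil => intro toks0 buf ctr; simp
  | cons ch cs ih =>
    intro toks0 buf ctr
    simp only [List.foldl_cons]
    rw [pvStepTokShift]
    rcases h : pvStepTok tar ([], buf, ctr) ch with ⟨T1, buf1, ctr1⟩
    rw [ih (toks0 ++ T1) buf1 ctr1, ih T1 buf1 ctr1]
    simp

-- the RLE state invariant: an empty pending group means a zero count
lemma pvRleInv (st : List Char × List Char × Int) (tk : Bool × List Char)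
    (h : st.2.1 = [] → st.2.2 = 0) (ht : tk.2 ≠ []) :
    (pvStepRle st tk).2.1 = [] → (pvStepRle st tk).2.2 = 0 := by
  rcases st with ⟨out, ref, cnt⟩
  rcases tk with ⟨isg, t⟩
  simp only [pvStepRle]
  split_ifs <;> simp_all

-- one A-step equals: tokenize one char, then RLE-fold the emitted token(s)
lemma pvStepCorr (tar : Int) (out temp ref : List Char) (cnt ctr : Int) (ch : Char)
    (hinv : ref = [] → cnt = 0) :
    pvStepA tar (out, temp, ref, cnt, ctr) ch
      = (match pvStepTok tar ([], temp, ctr) ch with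
         | (T1, buf1, ctr1) =>
           match T1.foldl pvStepRle (out, ref, cnt) with
           | (o, r, c) => (o, buf1, r, c, ctr1)) := by
  simp only [pvStepA, pvStepTok]
  split_ifs <;> simp_all [pvStepRle, pvCntStr] <;> first | omega | (split_ifs <;> simp_all)

lemma pvMain (tar : Int) (cs : List Char) :
    ∀ (out temp ref : List Char) (cnt ctr : Int), (ref = [] → cnt = 0) →
    cs.foldl (pvStepA tar) (out, temp, ref, cnt, ctr)
      = (match cs.foldl (pvStepTok tar) ([], temp, ctr) with
         | (toks, buf, ctr') =>
           match toks.foldl pvStepRle (out, ref, cnt) with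
           | (out', ref', cnt') => (out', buf, ref', cnt', ctr')) := by
  induction cs with
  | nil => intro out temp ref cnt ctr _; simp
  | cons ch cs ih =>
    intro out temp ref cnt ctr hinv
    simp only [List.foldl_cons]
    rw [pvStepCorr tar out temp ref cnt ctr ch hinv]
    rcases hstep : pvStepTok tar ([], temp, ctr) ch with ⟨T1, buf1, ctr1⟩
    rcases hrle : T1.foldl pvStepRle (out, ref, cnt) with ⟨o1, r1, c1⟩
    have hinv1 : r1 = [] → c1 = 0 := by
      -- T1 is [] or a single token with nonempty payload
      have : T1 = [] ∨ ∃ tk : Bool × List Char, T1 = [tk] ∧ tk.2 ≠ [] := by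
        revert hstep; simp only [pvStepTok]; split_ifs <;> intro hstep <;> aesop
      rcases this with h | ⟨tk, rfl, ht⟩
      · subst h
        simp only [List.foldl_nil, Prod.mk.injEq] at hrle
        obtain ⟨h1, h2, h3⟩ := hrle
        subst h1; subst h2; subst h3; exact hinv
      · simp only [List.foldl_cons, List.foldl_nil] at hrle
        intro h
        have := pvRleInv (out, ref, cnt) tk hinv ht
        rw [hrle] at this; exact this h
    simp only []
    rw [hrle]
    rw [ih o1 buf1 r1 c1 ctr1 hinv1]
    rw [pvTokShift tar cs T1 buf1 ctr1]
    rcases hT : cs.foldl (pvStepTok tar) ([], buf1, ctr1) with ⟨T2, buf2, ctr2⟩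
    simp only [List.foldl_append]
    rw [hrle]

-- ===== VERDICT (by name: the statement is the Claim_ definition above) =====
theorem parCondense_spec : Claim_equal_parCondense := by
  unfold Claim_equal_parCondense
  intro form tar _
  unfold Spec_parCondense parCondense parCondense_alt
  have h := pvMain tar (form.toList ++ ['@']) [] [] [] 0 0 (fun _ => rfl)
  rcases h1 : (form.toList ++ ['@']).foldl (pvStepTok tar) ([], [], 0) with ⟨toks, buf, c⟩
  rw [h1] at h
  dsimp only at h
  rcases h2 : toks.foldl pvStepRle ([], [], 0) with ⟨o, r, c2⟩
  rw [h2] at h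
  rw [h]
  dsimp only
  rw [h2]
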